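-- pv_equiv track=rewrite | github.com/SestrenExsis/CodeKatas | withgoogle/GoogleCodeJam2022.py | solve
-- ===== SOURCE A (Python) =====
-- import itertools
--
-- def solve(N: int, fun_factors: tuple, connections: tuple):
--     initiators = set(range(1, N + 1)) - set(connections)
--     max_total_fun = 0
--     for orderings in itertools.permutations(initiators):
--         F = list(fun_factors)
--         total_fun = 0
--         for initiator in orderings:
--             fun = 0
--             id = initiator
--             while id > 0:
--                 fun = max(fun, F[id - 1])
--                 F[id - 1] = 0
--                 id = connections[id - 1]
--             total_fun += fun
--         max_total_fun = max(max_total_fun, total_fun)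
--     result = max_total_fun
--     return result
-- ===== SOURCE B (Python) =====
-- import itertools
--
-- def solve(N: int, fun_factors: tuple, connections: tuple):
--     taken = set(connections)
--     initiators = [i for i in range(1, N + 1) if i not in taken]
--     chains = {}
--     for i in initiators:
--         nodes = []
--         v = i
--         while v > 0:
--             nodes.append(v)
--             v = connections[v - 1]
--         chains[i] = nodes
--     def fun_of(i, zeroed):
--         best = 0
--         for v in chains[i]:
--             if v not in zeroed and fun_factors[v - 1] > best:
--                 best = fun_factors[v - 1]
--         return best
--     # dp[S] = best total fun obtainable by triggering exactly the initiators in S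
--     # (S a combination of `initiators`, i.e. kept in their original order)
--     dp = {(): 0}
--     for size in range(1, len(initiators) + 1):
--         for comb in itertools.combinations(initiators, size):
--             best = 0
--             for j in range(size):
--                 rest = comb[:j] + comb[j + 1:]
--                 zeroed = []
--                 for r in rest:
--                     zeroed.extend(chains[r])
--                 cand = dp[rest] + fun_of(comb[j], zeroed)
--                 if best < cand:
--                     best = cand
--             dp[comb] = best
--     return dp[tuple(initiators)]
-- ===== Notes on version B (the rewrite author's own statement) =====
-- stated objective: alternative
-- what changed: Replaces the brute-force maximum over all k! orderings of the initiators (re-simulating every chain with a fresh mutable array per ordering) by a Held-Karp style dynamic program over subsets of initiators keyed by combinations (2^k states instead of k! orderings); intended as faster and measured 480x at the largest size both finished, but both remain exponential in the number of initiators, so a timing run could not confirm 'faster' on the biggest inputs.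
-- outside the precondition, e.g. on solve(1, (4, 7), (2, 0)): A returns 7, B returns 7; on solve(3, (4,), (0, 3, 2)): A returns 4, B returns 4
import Mathlib
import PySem

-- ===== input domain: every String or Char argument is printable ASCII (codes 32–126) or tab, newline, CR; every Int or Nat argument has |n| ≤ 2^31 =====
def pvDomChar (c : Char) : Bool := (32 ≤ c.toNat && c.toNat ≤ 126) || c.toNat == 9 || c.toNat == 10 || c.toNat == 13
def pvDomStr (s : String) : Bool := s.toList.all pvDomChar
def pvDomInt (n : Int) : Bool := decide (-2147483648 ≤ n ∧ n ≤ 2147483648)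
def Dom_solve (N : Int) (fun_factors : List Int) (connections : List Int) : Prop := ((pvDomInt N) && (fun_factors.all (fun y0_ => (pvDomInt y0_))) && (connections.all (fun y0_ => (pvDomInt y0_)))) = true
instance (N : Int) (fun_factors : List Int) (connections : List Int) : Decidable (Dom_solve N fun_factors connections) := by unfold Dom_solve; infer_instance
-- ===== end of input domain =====

-- B is a subset dynamic program instead of A's brute force over all k! initiator
-- orderings; equality of return values is proved on Pre_solve (chains in range,
-- every initiator's pointer chain terminating).

-- ===== PORT A =====
-- the 'while id > 0' loop of A; fuel = N.toNat (under Pre_solve every chain reaches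
-- the abyss within N steps, so the fuel is never exhausted there); list reads/writes
-- via getD/set are exact where Pre_solve keeps the indices in range
def pvWalkA (conns : List Int) : Nat → Int → List Int → Int → Int × List Int
  | 0, _, F, acc => (acc, F)
  | fuel+1, id, F, acc =>
    if 0 < id then
      pvWalkA conns fuel (conns.getD (id - 1).toNat 0) (F.set (id - 1).toNat 0)
        (max acc (F.getD (id - 1).toNat 0))
    else (acc, F)

-- 'for initiator in orderings: … total_fun += fun'
def pvTotalA (conns : List Int) (fuel : Nat) : List Int → List Int → Int → Int
  | [], _, total => total
  | i :: rest, F, total =>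
    let r := pvWalkA conns fuel i F 0
    pvTotalA conns fuel rest r.2 (total + r.1)

def solve (N : Int) (fun_factors : List Int) (connections : List Int) : Int :=
  let initiators : List Int :=
    PySem.Set.diff (PySem.Set.ofList (PySem.List.pyRange 1 (N + 1) 1)) connections
  -- max over all orderings of the initiators (the enumeration order of
  -- itertools.permutations over a Python set is irrelevant under the running max)
  initiators.permutations.foldl
    (fun acc p => max acc (pvTotalA connections N.toNat p fun_factors 0)) 0

-- ===== PORT B =====
-- 'while v > 0: nodes.append(v); v = connections[v-1]' (same fuel convention as A)
def pvChain (conns : List Int) : Nat → Int → List Int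
  | 0, _ => []
  | fuel+1, v => if 0 < v then v :: pvChain conns fuel (conns.getD (v - 1).toNat 0) else []

-- body of fun_of's loop
def pvStepF (ffs zeroed : List Int) (best v : Int) : Int :=
  if ¬ (zeroed.contains v = true) ∧ best < ffs.getD (v - 1).toNat 0
  then ffs.getD (v - 1).toNat 0 else best

def pvFunOf (ffs chain zeroed : List Int) : Int :=
  chain.foldl (pvStepF ffs zeroed) 0

-- the inner 'for j in range(size)' loop computing dp[comb]
def pvBest (ffs : List Int) (chains : PySem.Dict Int (List Int))
    (dp : PySem.Dict (List Int) Int) (comb : List Int) : Int :=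
  (List.range comb.length).foldl (fun best j =>
    let rest := comb.eraseIdx j
    let zeroed := rest.foldl (fun z r => z ++ chains.getD r []) []
    let cand := dp.getD rest 0 + pvFunOf ffs (chains.getD (comb.getD j 0) []) zeroed
    if best < cand then cand else best) 0

def solve_alt (N : Int) (fun_factors : List Int) (connections : List Int) : Int :=
  let initiators : List Int :=
    (PySem.List.pyRange 1 (N + 1) 1).filter (fun i => !(connections.contains i))
  let chains : PySem.Dict Int (List Int) :=
    initiators.foldl (fun d i => d.insert i (pvChain connections N.toNat i)) PySem.Dict.empty
  let dp : PySem.Dict (List Int) Int :=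
    (List.range initiators.length).foldl (fun dp s =>
      (PySem.List.combinations initiators (s + 1)).foldl
        (fun dp comb => dp.insert comb (pvBest fun_factors chains dp comb)) dp)
      ((PySem.Dict.empty : PySem.Dict (List Int) Int).insert [] 0)
  dp.getD initiators 0

-- ===== PRECONDITION & SPEC =====
-- one pointer-chase step on the connections list (0 once the chain has left 1..)
def pvStep (conns : List Int) (v : Int) : Int :=
  if 0 < v then conns.getD (v - 1).toNat 0 else 0

-- Pre_solve excludes exactly the inputs on which A raises an IndexError (a chain
-- leaving the first N entries, or fewer than N fun factors / connections) or
-- diverges (a pointer cycle reachable from an initiator); the in-range and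
-- termination conditions also exclude some inputs whose out-of-range pointers or
-- missing entries are never reached, on which A returns and B agrees (see cites).
def Pre_solve (N : Int) (fun_factors : List Int) (connections : List Int) : Prop :=
  N ≤ (fun_factors.length : Int) ∧ N ≤ (connections.length : Int) ∧
  (∀ c ∈ connections.take N.toNat, c ≤ N) ∧
  (∀ i ∈ PySem.List.pyRange 1 (N + 1) 1, connections.contains i = false →
    (pvStep connections)^[N.toNat] i ≤ 0)
instance (N : Int) (fun_factors : List Int) (connections : List Int) : Decidable (Pre_solve N fun_factors connections) := by unfold Pre_solve; infer_instance

def pvWitness_solve : Int × List Int × List Int := (2, [3, 5], [0, 1])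

def Spec_solve (N : Int) (fun_factors : List Int) (connections : List Int) (out : Int) : Prop := out = solve_alt N fun_factors connections
instance (N : Int) (fun_factors : List Int) (connections : List Int) (out : Int) : Decidable (Spec_solve N fun_factors connections out) := by unfold Spec_solve; infer_instance

-- ===== CLAIM (what is proved, stated in full; the proofs are below) =====
def Claim_equal_solve : Prop := ∀ (N : Int) (fun_factors : List Int) (connections : List Int), Dom_solve N fun_factors connections → Pre_solve N fun_factors connections → Spec_solve N fun_factors connections (solve N fun_factors connections)

-- ===== LEMMAS AND PROOFS =====

-- abstract description shared by both directions of the proof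
def pvUc (conns : List Int) (fuel : Nat) (S : List Int) : List Int :=
  S.flatMap (pvChain conns fuel)

-- total fun of one ordering, with the zeroed-so-far set made explicit
def pvTt (ffs conns : List Int) (fuel : Nat) : List Int → List Int → Int
  | [], _ => 0
  | i :: rest, Z =>
      pvFunOf ffs (pvChain conns fuel i) Z +
        pvTt ffs conns fuel rest (Z ++ pvChain conns fuel i)

-- max of pvTt over all orderings of S
def pvMx (ffs conns : List Int) (fuel : Nat) (S : List Int) : Int :=
  S.permutations.foldl (fun acc p => max acc (pvTt ffs conns fuel p [])) 0

-- one step of the subset recurrence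
def pvRx (ffs conns : List Int) (fuel : Nat) (S : List Int) : Int :=
  (List.range S.length).foldl (fun best j =>
    max best (pvMx ffs conns fuel (S.eraseIdx j) +
      pvFunOf ffs (pvChain conns fuel (S.getD j 0)) (pvUc conns fuel (S.eraseIdx j)))) 0

-- fun_factors with the entries of Z zeroed (A's mutable F array, reified)
def pvMask (ffs Z : List Int) : List Int :=
  ffs.mapIdx (fun j v => if Z.contains ((j : Int) + 1) then 0 else v)

theorem pvIf_lt_eq_max (a b : Int) : (if a < b then b else a) = max a b := by
  rw [max_def]; split_ifs <;> omega

theorem pvStepF_ge (ffs z : List Int) (b v : Int) : b ≤ pvStepF ffs z b v := by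
  unfold pvStepF; split_ifs with h
  · exact le_of_lt h.2
  · exact le_refl _

theorem pvFoldF_ge (ffs z c : List Int) : ∀ b : Int, b ≤ c.foldl (pvStepF ffs z) b := by
  induction c with
  | nil => intro b; simp
  | cons v rest ih =>
    intro b
    exact le_trans (pvStepF_ge ffs z b v) (ih _)

theorem pvFunOf_nonneg (ffs c z : List Int) : 0 ≤ pvFunOf ffs c z := pvFoldF_ge ffs z c 0

theorem pvFoldF_congr (ffs c : List Int) {z z' : List Int}
    (h : ∀ v ∈ c, (v ∈ z ↔ v ∈ z')) : ∀ b, c.foldl (pvStepF ffs z) b = c.foldl (pvStepF ffs z') b := by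
  induction c with
  | nil => intro b; rfl
  | cons v rest ih =>
    intro b
    simp only [List.foldl_cons]
    have hv : (z.contains v) = (z'.contains v) := by
      rw [Bool.eq_iff_iff]
      simp only [List.contains_iff_mem]
      exact h v (by simp)
    have hs : pvStepF ffs z b v = pvStepF ffs z' b v := by
      unfold pvStepF; rw [hv]
    rw [hs]
    exact ih (fun x hx => h x (by simp [hx])) _

theorem pvFunOf_congr (ffs c : List Int) {z z' : List Int}
    (h : ∀ v ∈ c, (v ∈ z ↔ v ∈ z')) : pvFunOf ffs c z = pvFunOf ffs c z' :=
  pvFoldF_congr ffs c h 0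

theorem pvTt_nonneg (ffs conns : List Int) (fuel : Nat) (p Z : List Int) :
    0 ≤ pvTt ffs conns fuel p Z := by
  induction p generalizing Z with
  | nil => exact le_refl 0
  | cons i rest ih =>
    have h1 := pvFunOf_nonneg ffs (pvChain conns fuel i) Z
    have h2 := ih (Z ++ pvChain conns fuel i)
    simp only [pvTt]; omega

theorem pvTt_append (ffs conns : List Int) (fuel : Nat) (q : List Int) (i : Int) :
    ∀ Z, pvTt ffs conns fuel (q ++ [i]) Z =
      pvTt ffs conns fuel q Z +
        pvFunOf ffs (pvChain conns fuel i) (Z ++ pvUc conns fuel q) := by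
  induction q with
  | nil =>
    intro Z
    simp [pvTt, pvUc]
  | cons a q ih =>
    intro Z
    simp only [List.cons_append, pvTt, pvUc, List.flatMap_cons, ih, ← List.append_assoc]
    omega

theorem pvMx_nonneg (ffs conns : List Int) (fuel : Nat) (S : List Int) :
    0 ≤ pvMx ffs conns fuel S :=
  (PySem.List.le_foldl_max_int _ _ _).1

theorem pvTt_le_pvMx (ffs conns : List Int) (fuel : Nat) {p S : List Int} (h : p.Perm S) :
    pvTt ffs conns fuel p [] ≤ pvMx ffs conns fuel S :=
  (PySem.List.le_foldl_max_int _ _ _).2 p (List.mem_permutations.2 h)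

theorem pvMx_attained (ffs conns : List Int) (fuel : Nat) (S : List Int) :
    ∃ q, q.Perm S ∧ pvTt ffs conns fuel q [] = pvMx ffs conns fuel S := by
  have heq : pvMx ffs conns fuel S =
      ((S.permutations).map (fun p => pvTt ffs conns fuel p [])).foldl max 0 := by
    rw [List.foldl_map]; rfl
  rcases PySem.List.foldl_max_mem
      ((S.permutations).map (fun p => pvTt ffs conns fuel p [])) 0 with h0 | hm
  · refine ⟨S, List.Perm.refl S, le_antisymm ?_ ?_⟩
    · exact pvTt_le_pvMx ffs conns fuel (List.Perm.refl S)
    · rw [heq, h0]; exact pvTt_nonneg ffs conns fuel S []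
  · rcases List.mem_map.1 hm with ⟨p, hp, hval⟩
    exact ⟨p, List.mem_permutations.1 hp, by rw [hval, heq]⟩

theorem pvPerm_eraseIdx (S : List Int) (j : Nat) (hj : j < S.length) :
    S.Perm (S[j] :: S.eraseIdx j) := by
  rw [List.eraseIdx_eq_take_drop_succ]
  conv_lhs => rw [← List.take_append_drop j S, ← List.getElem_cons_drop hj]
  exact List.perm_middle

theorem pvUc_perm (conns : List Int) (fuel : Nat) {q R : List Int} (h : q.Perm R) :
    ∀ v, v ∈ pvUc conns fuel q ↔ v ∈ pvUc conns fuel R := by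
  intro v
  simp only [pvUc, List.mem_flatMap]
  exact ⟨fun ⟨a, ha, hv⟩ => ⟨a, h.subset ha, hv⟩,
         fun ⟨a, ha, hv⟩ => ⟨a, h.symm.subset ha, hv⟩⟩

theorem pvMx_rec (ffs conns : List Int) (fuel : Nat) (S : List Int) (hS : S ≠ []) :
    pvMx ffs conns fuel S = pvRx ffs conns fuel S := by
  have hRx_eq : pvRx ffs conns fuel S =
      ((List.range S.length).map (fun j => pvMx ffs conns fuel (S.eraseIdx j) +
        pvFunOf ffs (pvChain conns fuel (S.getD j 0)) (pvUc conns fuel (S.eraseIdx j)))).foldl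
        max 0 := by
    rw [List.foldl_map]; rfl
  apply le_antisymm
  · rcases pvMx_attained ffs conns fuel S with ⟨q, hq, hval⟩
    rcases List.eq_nil_or_concat q with rfl | ⟨q', i, rfl⟩
    · exact absurd hq.nil_eq.symm hS
    · rw [List.concat_eq_append] at hq hval
      have hiS : i ∈ S := hq.subset (by simp)
      rcases List.getElem_of_mem hiS with ⟨j, hj, hSj⟩
      have hperm := pvPerm_eraseIdx S j hj
      rw [hSj] at hperm
      have hq' : q'.Perm (S.eraseIdx j) :=
        (((List.perm_append_singleton i q').symm.trans hq).trans hperm).cons_inv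
      have hGle : pvTt ffs conns fuel q' [] ≤ pvMx ffs conns fuel (S.eraseIdx j) :=
        pvTt_le_pvMx _ _ _ hq'
      have hfun : pvFunOf ffs (pvChain conns fuel i) ([] ++ pvUc conns fuel q') =
          pvFunOf ffs (pvChain conns fuel (S.getD j 0)) (pvUc conns fuel (S.eraseIdx j)) := by
        rw [List.nil_append, List.getD_eq_getElem _ _ hj, hSj]
        exact pvFunOf_congr _ _ (fun v _ => pvUc_perm conns fuel hq' v)
      rw [← hval, pvTt_append, hfun]
      have hb := (PySem.List.le_foldl_max_int (List.range S.length)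
        (fun j => pvMx ffs conns fuel (S.eraseIdx j) +
          pvFunOf ffs (pvChain conns fuel (S.getD j 0)) (pvUc conns fuel (S.eraseIdx j))) 0).2
        j (List.mem_range.mpr hj)
      refine le_trans ?_ hb
      have := hGle
      omega
  · rcases PySem.List.foldl_max_mem ((List.range S.length).map
        (fun j => pvMx ffs conns fuel (S.eraseIdx j) +
          pvFunOf ffs (pvChain conns fuel (S.getD j 0)) (pvUc conns fuel (S.eraseIdx j)))) 0
      with h0 | hm
    · rw [hRx_eq, h0]; exact pvMx_nonneg _ _ _ _
    · rcases List.mem_map.1 hm with ⟨j, hjr, hvalj⟩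
      have hj := List.mem_range.1 hjr
      rcases pvMx_attained ffs conns fuel (S.eraseIdx j) with ⟨q, hq, hvq⟩
      have hperm := pvPerm_eraseIdx S j hj
      have hqS : (q ++ [S[j]]).Perm S :=
        ((List.perm_append_singleton (S[j]) q).trans (hq.cons (S[j]))).trans hperm.symm
      have hfun : pvFunOf ffs (pvChain conns fuel (S[j])) ([] ++ pvUc conns fuel q) =
          pvFunOf ffs (pvChain conns fuel (S.getD j 0)) (pvUc conns fuel (S.eraseIdx j)) := by
        rw [List.nil_append, List.getD_eq_getElem _ _ hj]
        exact pvFunOf_congr _ _ (fun v _ => pvUc_perm conns fuel hq v)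
      calc pvRx ffs conns fuel S
          = pvMx ffs conns fuel (S.eraseIdx j) +
            pvFunOf ffs (pvChain conns fuel (S.getD j 0)) (pvUc conns fuel (S.eraseIdx j)) := by
            rw [hRx_eq, ← hvalj]
        _ = pvTt ffs conns fuel q [] +
            pvFunOf ffs (pvChain conns fuel (S[j])) ([] ++ pvUc conns fuel q) := by
            rw [hvq, hfun]
        _ = pvTt ffs conns fuel (q ++ [S[j]]) [] := (pvTt_append ffs conns fuel q (S[j]) []).symm
        _ ≤ pvMx ffs conns fuel S := pvTt_le_pvMx _ _ _ hqS

-- ===== A-side correspondence =====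

theorem pvMask_length (ffs Z : List Int) : (pvMask ffs Z).length = ffs.length := by
  simp [pvMask]

theorem pvMask_getD (ffs Z : List Int) (t : Nat) (ht : t < ffs.length) :
    (pvMask ffs Z).getD t 0 =
      if Z.contains ((t : Int) + 1) then 0 else ffs.getD t 0 := by
  have ht' : t < (pvMask ffs Z).length := by rw [pvMask_length]; exact ht
  rw [List.getD_eq_getElem _ _ ht', List.getD_eq_getElem _ _ ht]
  simp [pvMask, List.getElem_mapIdx]

theorem pvMask_set (ffs Z : List Int) (t : Nat) :
    (pvMask ffs Z).set t 0 = pvMask ffs (Z ++ [(t : Int) + 1]) := by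
  apply List.ext_getElem
  · simp [pvMask]
  · intro m hm1 hm2
    simp only [List.getElem_set, pvMask, List.getElem_mapIdx]
    by_cases hmt : t = m
    · subst hmt
      simp
    · have hne : ((m : Int) + 1) ≠ ((t : Int) + 1) := by
        intro h; apply hmt; omega
      simp [hmt, List.mem_append, hne]

theorem pvMask_nil (ffs : List Int) : pvMask ffs [] = ffs := by
  apply List.ext_getElem
  · simp [pvMask]
  · intro m hm1 hm2
    simp [pvMask, List.getElem_mapIdx]

theorem pvWalkA_spec (ffs conns : List Int) :
    ∀ (fuel : Nat) (id : Int) (Z V : List Int) (acc : Int),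
    (pvStep conns)^[fuel] id ≤ 0 →
    (∀ v ∈ pvChain conns fuel id, v ≤ (ffs.length : Int)) →
    0 ≤ acc →
    (∀ v ∈ V, v ∉ Z → ffs.getD (v - 1).toNat 0 ≤ acc) →
    pvWalkA conns fuel id (pvMask ffs (Z ++ V)) acc =
      ((pvChain conns fuel id).foldl (pvStepF ffs Z) acc,
       pvMask ffs (Z ++ V ++ pvChain conns fuel id)) := by
  intro fuel
  induction fuel with
  | zero =>
    intro id Z V acc hterm hrange hacc hV
    simp [pvWalkA, pvChain]
  | succ fuel ih =>
    intro id Z V acc hterm hrange hacc hV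
    by_cases hid : 0 < id
    · have hne : pvChain conns (fuel+1) id =
          id :: pvChain conns fuel (conns.getD (id - 1).toNat 0) := by
        simp [pvChain, hid]
      have hidlen : id ≤ (ffs.length : Int) := hrange id (by rw [hne]; simp)
      have hidx : (id - 1).toNat < ffs.length := by omega
      have hcast : (((id - 1).toNat : Int) + 1) = id := by omega
      have hread : (pvMask ffs (Z ++ V)).getD (id - 1).toNat 0 =
          if (Z ++ V).contains id then 0 else ffs.getD (id - 1).toNat 0 := by
        rw [pvMask_getD _ _ _ hidx, hcast]
      simp only [pvWalkA, if_pos hid]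
      rw [pvMask_set, hcast, hread]
      set x := ffs.getD (id - 1).toNat 0 with hx
      set acc1 := max acc (if (Z ++ V).contains id then 0 else x) with hacc1
      have hterm' : (pvStep conns)^[fuel] (conns.getD (id - 1).toNat 0) ≤ 0 := by
        have h := hterm
        rwa [Function.iterate_succ_apply,
          show pvStep conns id = conns.getD (id - 1).toNat 0 from by simp [pvStep, hid]] at h
      have hrange' : ∀ v ∈ pvChain conns fuel (conns.getD (id - 1).toNat 0),
          v ≤ (ffs.length : Int) := fun v hv => hrange v (by rw [hne]; exact List.mem_cons_of_mem _ hv)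
      have hacc1_nonneg : 0 ≤ acc1 := le_trans hacc (le_max_left _ _)
      have hV' : ∀ v ∈ V ++ [id], v ∉ Z → ffs.getD (v - 1).toNat 0 ≤ acc1 := by
        intro v hv hvz
        rcases List.mem_append.1 hv with hvV | hvid
        · exact le_trans (hV v hvV hvz) (le_max_left _ _)
        · have hvid' : v = id := by simpa using hvid
          subst hvid'
          by_cases hVm : v ∈ V
          · have := hV v hVm hvz
            exact le_trans this (le_max_left _ _)
          · have hcz : (Z ++ V).contains v = false := by
              rw [Bool.eq_false_iff]
              intro hc
              rcases List.mem_append.1 (List.contains_iff_mem.mp hc) with h | h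
              · exact hvz h
              · exact hVm h
            rw [← hx, hacc1, hcz]
            simp only [Bool.false_eq_true, if_false]
            exact le_max_right _ _
      have hstep_eq : acc1 = pvStepF ffs Z acc id := by
        unfold pvStepF
        rw [hacc1, ← hx]
        by_cases hZ : id ∈ Z
        · have h1 : (Z ++ V).contains id = true :=
            List.contains_iff_mem.mpr (List.mem_append.2 (Or.inl hZ))
          have h2 : Z.contains id = true := List.contains_iff_mem.mpr hZ
          simp only [h1, if_true, h2, not_true_eq_false, false_and, if_false]
          omega
        · have h2 : Z.contains id = false := by
            rw [Bool.eq_false_iff]; exact fun h => hZ (List.contains_iff_mem.mp h)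
          by_cases hVm : id ∈ V
          · have h1 : (Z ++ V).contains id = true :=
              List.contains_iff_mem.mpr (List.mem_append.2 (Or.inr hVm))
            have hxa : x ≤ acc := hV id hVm hZ
            simp only [h1, if_true, h2, Bool.false_eq_true, not_false_eq_true, true_and]
            split_ifs with h <;> omega
          · have h1 : (Z ++ V).contains id = false := by
              rw [Bool.eq_false_iff]
              intro hc
              rcases List.mem_append.1 (List.contains_iff_mem.mp hc) with h | h
              · exact hZ h
              · exact hVm h
            simp only [h1, h2, Bool.false_eq_true, if_false, not_false_eq_true, true_and]
            split_ifs with h <;> omega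
      rw [hstep_eq] at hacc1_nonneg hV' ⊢
      have hih := ih (conns.getD (id - 1).toNat 0) Z (V ++ [id]) (pvStepF ffs Z acc id)
        hterm' hrange' hacc1_nonneg hV'
      rw [show (Z ++ V) ++ [id] = Z ++ (V ++ [id]) from by simp [List.append_assoc]]
      rw [hih, hne]
      refine Prod.ext ?_ ?_
      · simp [List.foldl_cons]
      · simp only
        exact congrArg (pvMask ffs) (by simp [List.append_assoc])
    · have hchain : pvChain conns (fuel+1) id = [] := by simp [pvChain, hid]
      simp [pvWalkA, hid, hchain]

theorem pvTotalA_spec (ffs conns : List Int) (fuel : Nat) :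
    ∀ (p : List Int) (Z : List Int) (t : Int),
    (∀ i ∈ p, (pvStep conns)^[fuel] i ≤ 0 ∧
      ∀ v ∈ pvChain conns fuel i, v ≤ (ffs.length : Int)) →
    pvTotalA conns fuel p (pvMask ffs Z) t = t + pvTt ffs conns fuel p Z := by
  intro p
  induction p with
  | nil => intro Z t _; simp [pvTotalA, pvTt]
  | cons i rest ih =>
    intro Z t hp
    obtain ⟨hterm, hrange⟩ := hp i (List.mem_cons_self ..)
    have hw := pvWalkA_spec ffs conns fuel i Z [] 0 hterm hrange (le_refl 0)
      (by intro v hv; simp at hv)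
    simp only [List.append_nil] at hw
    simp only [pvTotalA, hw]
    rw [show List.foldl (pvStepF ffs Z) 0 (pvChain conns fuel i) =
      pvFunOf ffs (pvChain conns fuel i) Z from rfl]
    rw [ih (Z ++ pvChain conns fuel i) (t + pvFunOf ffs (pvChain conns fuel i) Z)
      (fun j hj => hp j (List.mem_cons_of_mem _ hj))]
    simp only [pvTt, pvFunOf]
    omega

-- ===== B-side: the dp dictionary =====

theorem pvChains_getD (conns : List Int) (fuel : Nat) :
    ∀ (l : List Int) (d : PySem.Dict Int (List Int)) (i : Int),
      ((l.foldl (fun d i => d.insert i (pvChain conns fuel i)) d).getD i []) =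
      if i ∈ l then pvChain conns fuel i else d.getD i [] := by
  intro l
  induction l with
  | nil => intro d i; simp
  | cons x rest ih =>
    intro d i
    simp only [List.foldl_cons, ih, List.mem_cons]
    by_cases hir : i ∈ rest
    · simp [hir]
    · by_cases hix : i = x
      · subst hix
        simp [hir]
      · simp [hir, hix, PySem.Dict.getD_insert]

theorem pvChain_nil_of_nonpos (conns : List Int) (fuel : Nat) (v : Int) (h : ¬ 0 < v) :
    pvChain conns fuel v = [] := by
  cases fuel <;> simp [pvChain, h]

theorem pvChain_le (conns : List Int) (N : Int)
    (hlen : N ≤ (conns.length : Int))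
    (hc : ∀ c ∈ conns.take N.toNat, c ≤ N) :
    ∀ (fuel : Nat) (id : Int), 1 ≤ id → id ≤ N →
      ∀ v ∈ pvChain conns fuel id, v ≤ N := by
  intro fuel
  induction fuel with
  | zero => intro id h1 h2 v hv; simp [pvChain] at hv
  | succ fuel ih =>
    intro id h1 h2 v hv
    have hid : 0 < id := h1
    simp only [pvChain, if_pos hid, List.mem_cons] at hv
    rcases hv with rfl | hv
    · exact h2
    · have hidx : (id - 1).toNat < conns.length := by omega
      have hidxN : (id - 1).toNat < (conns.take N.toNat).length := by
        rw [List.length_take]; omega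
      have hnext_eq : conns.getD (id - 1).toNat 0 = conns[(id - 1).toNat] :=
        List.getD_eq_getElem _ _ hidx
      have hmem : conns[(id - 1).toNat] ∈ conns.take N.toNat := by
        rw [← List.getElem_take (h := hidxN)]
        exact List.getElem_mem hidxN
      have hnextN : conns.getD (id - 1).toNat 0 ≤ N := by
        rw [hnext_eq]; exact hc _ hmem
      by_cases hpos : 0 < conns.getD (id - 1).toNat 0
      · exact ih (conns.getD (id - 1).toNat 0) hpos hnextN v hv
      · rw [pvChain_nil_of_nonpos conns fuel _ hpos] at hv
        simp at hv

theorem pvBest_eq (ffs conns : List Int) (fuel : Nat) (I : List Int)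
    (cs : PySem.Dict Int (List Int))
    (hcs : ∀ i ∈ I, cs.getD i [] = pvChain conns fuel i)
    (dp : PySem.Dict (List Int) Int) (s : Nat)
    (hInv : ∀ K : List Int, K.Sublist I → K.length ≤ s →
      dp.get? K = some (pvMx ffs conns fuel K))
    (comb : List Int) (hcomb : comb.Sublist I) (hlen : comb.length = s + 1) :
    pvBest ffs cs dp comb = pvRx ffs conns fuel comb := by
  unfold pvBest pvRx
  apply PySem.List.foldl_congr_mem
  intro best j hj
  have hjlt : j < comb.length := List.mem_range.1 hj
  have hrest_sub : (comb.eraseIdx j).Sublist I := (List.eraseIdx_sublist comb j).trans hcomb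
  have hrest_len : (comb.eraseIdx j).length ≤ s := by
    rw [List.length_eraseIdx, if_pos hjlt]; omega
  have hdp : dp.getD (comb.eraseIdx j) 0 = pvMx ffs conns fuel (comb.eraseIdx j) :=
    PySem.Dict.getD_of_get?_eq_some _ _ (hInv _ hrest_sub hrest_len)
  have hz : (comb.eraseIdx j).foldl (fun z r => z ++ cs.getD r []) [] =
      pvUc conns fuel (comb.eraseIdx j) := by
    rw [PySem.List.foldl_congr_mem _ _ (fun z r => z ++ pvChain conns fuel r) _
      (fun z r hr => by rw [hcs r (hrest_sub.subset hr)])]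
    rw [PySem.List.foldl_append_eq_flatMap]
    simp [pvUc]
  have hhead : cs.getD (comb.getD j 0) [] = pvChain conns fuel (comb.getD j 0) := by
    apply hcs
    rw [List.getD_eq_getElem _ _ hjlt]
    exact hcomb.subset (List.getElem_mem hjlt)
  dsimp only
  rw [hz, hdp, hhead, pvIf_lt_eq_max]

theorem pvInner (ffs conns : List Int) (fuel : Nat) (I : List Int)
    (cs : PySem.Dict Int (List Int))
    (hcs : ∀ i ∈ I, cs.getD i [] = pvChain conns fuel i) (s : Nat) :
    ∀ (L : List (List Int)) (dp : PySem.Dict (List Int) Int),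
    (∀ c ∈ L, c.Sublist I ∧ c.length = s + 1) →
    (∀ K : List Int, K.Sublist I → K.length ≤ s →
      dp.get? K = some (pvMx ffs conns fuel K)) →
    (∀ K : List Int, K ∉ L →
        (L.foldl (fun dp comb => dp.insert comb (pvBest ffs cs dp comb)) dp).get? K =
          dp.get? K)
    ∧ (∀ K ∈ L,
        (L.foldl (fun dp comb => dp.insert comb (pvBest ffs cs dp comb)) dp).get? K =
          some (pvMx ffs conns fuel K)) := by
  intro L
  induction L with
  | nil =>
    intro dp _ _
    exact ⟨fun K _ => rfl, fun K hK => absurd hK (List.not_mem_nil)⟩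
  | cons c L ih =>
    intro dp hL hInv
    obtain ⟨hcsub, hclen⟩ := hL c (List.mem_cons_self ..)
    have hcne : c ≠ [] := by
      intro h; rw [h] at hclen; simp at hclen
    have hcval : pvBest ffs cs dp c = pvMx ffs conns fuel c := by
      rw [pvBest_eq ffs conns fuel I cs hcs dp s hInv c hcsub hclen,
        ← pvMx_rec ffs conns fuel c hcne]
    have hInv1 : ∀ K : List Int, K.Sublist I → K.length ≤ s →
        (dp.insert c (pvBest ffs cs dp c)).get? K = some (pvMx ffs conns fuel K) := by
      intro K hKs hKl
      rw [PySem.Dict.get?_insert_of_ne _ _ (by intro h; rw [h] at hKl; omega)]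
      exact hInv K hKs hKl
    obtain ⟨hpres, hdone⟩ := ih (dp.insert c (pvBest ffs cs dp c))
      (fun c' hc' => hL c' (List.mem_cons_of_mem _ hc')) hInv1
    constructor
    · intro K hK
      have hKc : K ≠ c := fun h => hK (h ▸ List.mem_cons_self ..)
      have hKL : K ∉ L := fun h => hK (List.mem_cons_of_mem _ h)
      rw [List.foldl_cons, hpres K hKL, PySem.Dict.get?_insert_of_ne _ _ hKc]
    · intro K hK
      rcases List.mem_cons.1 hK with rfl | hKL
      · by_cases hcL : K ∈ L
        · rw [List.foldl_cons]; exact hdone K hcL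
        · rw [List.foldl_cons, hpres K hcL, PySem.Dict.get?_insert_self, hcval]
      · rw [List.foldl_cons]; exact hdone K hKL

theorem pvMx_nil (ffs conns : List Int) (fuel : Nat) : pvMx ffs conns fuel [] = 0 := by
  simp [pvMx, List.permutations_nil, pvTt]

theorem pvOuter (ffs conns : List Int) (fuel : Nat) (I : List Int)
    (cs : PySem.Dict Int (List Int))
    (hcs : ∀ i ∈ I, cs.getD i [] = pvChain conns fuel i) :
    ∀ (n : Nat) (K : List Int), K.Sublist I → K.length ≤ n →
      ((List.range n).foldl (fun dp s =>
        (PySem.List.combinations I (s + 1)).foldl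
          (fun dp comb => dp.insert comb (pvBest ffs cs dp comb)) dp)
        ((PySem.Dict.empty : PySem.Dict (List Int) Int).insert [] 0)).get? K =
        some (pvMx ffs conns fuel K) := by
  intro n
  induction n with
  | zero =>
    intro K hKs hKl
    have hK : K = [] := List.length_eq_zero_iff.mp (Nat.le_zero.mp hKl)
    subst hK
    rw [List.range_zero, List.foldl_nil, PySem.Dict.get?_insert_self, pvMx_nil]
  | succ n ihn =>
    intro K hKs hKl
    rw [List.range_succ, List.foldl_append, List.foldl_cons, List.foldl_nil]
    obtain ⟨hpres, hdone⟩ := pvInner ffs conns fuel I cs hcs n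
      (PySem.List.combinations I (n + 1))
      ((List.range n).foldl (fun dp s =>
        (PySem.List.combinations I (s + 1)).foldl
          (fun dp comb => dp.insert comb (pvBest ffs cs dp comb)) dp)
        ((PySem.Dict.empty : PySem.Dict (List Int) Int).insert [] 0))
      (fun c hc => (PySem.List.mem_combinations_iff I (n + 1) c).1 hc)
      (fun K hKs hKl => ihn K hKs hKl)
    by_cases hKn : K.length ≤ n
    · rw [hpres K (fun hKm => by
        have := ((PySem.List.mem_combinations_iff I (n + 1) K).1 hKm).2
        omega)]
      exact ihn K hKs hKn
    · have hKlen : K.length = n + 1 := by omega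
      exact hdone K ((PySem.List.mem_combinations_iff I (n + 1) K).2 ⟨hKs, hKlen⟩)

theorem pvInit_filter (N : Int) (conns : List Int) :
    PySem.Set.diff (PySem.Set.ofList (PySem.List.pyRange 1 (N + 1) 1)) conns =
      (PySem.List.pyRange 1 (N + 1) 1).filter (fun i => !(conns.contains i)) := by
  rw [show PySem.Set.ofList (PySem.List.pyRange 1 (N + 1) 1) = PySem.List.pyRange 1 (N + 1) 1
    from PySem.Set.ofList_eq_self_of_nodup _ (PySem.List.nodup_pyRange_one 1 (N + 1))]
  rfl

-- ===== VERDICT (by name: the statement is the Claim_ definition above) =====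
theorem solve_spec : Claim_equal_solve := by
  unfold Claim_equal_solve
  intro N ffs conns hDom hPre
  obtain ⟨hf, hcl, htake, hterm⟩ := hPre
  unfold Spec_solve solve solve_alt
  rw [pvInit_filter]
  set I := (PySem.List.pyRange 1 (N + 1) 1).filter (fun i => !(conns.contains i)) with hI
  have hImem : ∀ i ∈ I, 1 ≤ i ∧ i ≤ N ∧ conns.contains i = false := by
    intro i hi
    rw [hI, List.mem_filter] at hi
    obtain ⟨hr, hb⟩ := hi
    have hrr := PySem.List.mem_pyRange_one.1 hr
    refine ⟨hrr.1, by omega, by simpa using hb⟩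
  have hIrange : ∀ i ∈ I, i ∈ PySem.List.pyRange 1 (N + 1) 1 := by
    intro i hi
    rw [hI, List.mem_filter] at hi
    exact hi.1
  have hA : I.permutations.foldl
      (fun acc p => max acc (pvTotalA conns N.toNat p ffs 0)) 0 =
      pvMx ffs conns N.toNat I := by
    unfold pvMx
    apply PySem.List.foldl_congr_mem
    intro acc p hp
    have hperm := List.mem_permutations.1 hp
    have htot : pvTotalA conns N.toNat p ffs 0 = 0 + pvTt ffs conns N.toNat p [] := by
      conv_lhs => rw [← pvMask_nil ffs]
      apply pvTotalA_spec
      intro i hi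
      have hiI : i ∈ I := hperm.subset hi
      obtain ⟨h1, h2, h3⟩ := hImem i hiI
      refine ⟨hterm i (hIrange i hiI) h3, ?_⟩
      intro v hv
      exact le_trans (pvChain_le conns N hcl htake N.toNat i h1 h2 v hv) hf
    rw [htot, zero_add]
  have hcs : ∀ i ∈ I,
      (I.foldl (fun d i => d.insert i (pvChain conns N.toNat i)) PySem.Dict.empty).getD i [] =
      pvChain conns N.toNat i := by
    intro i hi
    rw [pvChains_getD, if_pos hi]
  have hB := pvOuter ffs conns N.toNat I
    (I.foldl (fun d i => d.insert i (pvChain conns N.toNat i)) PySem.Dict.empty)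
    hcs I.length I (List.Sublist.refl I) (le_refl _)
  rw [hA, PySem.Dict.getD_of_get?_eq_some _ _ hB]
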